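-- pv_equiv track=rewrite | github.com/charge1203/Algorithm | programmers/introduction/옹알이(1).py | solution
-- ===== SOURCE A (Python) =====
-- import itertools
--
-- def solution(babbling):
--     answer = 0
--     word = ["aya", "ye", "woo", "ma"]
--     nPr2 = itertools.permutations(word, 2)
--     nPr3 = itertools.permutations(word, 3)
--     nPr4 = itertools.permutations(word, 4)
--     for i in list(nPr2):
--         word.append(i[0]+i[1])
--     for i in list(nPr3):
--         word.append(i[0]+i[1]+i[2])
--     for i in list(nPr4):
--         word.append(i[0]+i[1]+i[2]+i[3])
--
--     for i in babbling:
--         if i in word: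
--             answer += 1
--     return answer
-- ===== SOURCE B (Python) =====
-- # B: greedy left-to-right parse (unique prefix by first letter) instead of
-- # precomputing all word-permutation concatenations.
-- def solution(babbling):
--     def parse(s):
--         used = []
--         rest = s
--         while rest:
--             if rest.startswith("aya"):
--                 w = "aya"
--             elif rest.startswith("ye"):
--                 w = "ye"
--             elif rest.startswith("woo"):
--                 w = "woo"
--             elif rest.startswith("ma"):
--                 w = "ma"
--             else:
--                 return False
--             if w in used:
--                 return False
--             used.append(w)
--             rest = rest[len(w):]
--         return len(used) > 0
--
--     answer = 0
--     for s in babbling: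
--         if parse(s):
--             answer += 1
--     return answer
-- ===== Notes on version B (the rewrite author's own statement) =====
-- stated objective: alternative
-- what changed: Instead of precomputing all 60 concatenations of 2-4 distinct base words via itertools.permutations and testing list membership, B greedily parses each string left-to-right (the base words have distinct first letters), accepting iff the string is fully consumed by at least one and no repeated base word. (constant-factor win: no 64-entry list scan per string)
import Mathlib
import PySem

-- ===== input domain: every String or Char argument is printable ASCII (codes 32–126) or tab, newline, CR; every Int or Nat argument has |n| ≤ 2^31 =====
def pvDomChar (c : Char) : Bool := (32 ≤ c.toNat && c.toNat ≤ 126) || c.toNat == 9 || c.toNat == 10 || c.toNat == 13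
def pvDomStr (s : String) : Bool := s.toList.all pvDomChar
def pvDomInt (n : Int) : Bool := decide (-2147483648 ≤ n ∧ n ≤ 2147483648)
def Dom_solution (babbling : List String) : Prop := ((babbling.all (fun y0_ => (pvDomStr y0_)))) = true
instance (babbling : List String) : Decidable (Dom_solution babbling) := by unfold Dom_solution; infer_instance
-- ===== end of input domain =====

-- B replaces A's precomputed list of all permutation concatenations by a greedy
-- left-to-right parse of each string (objective: alternative decomposition).

-- ===== PORT A =====
-- port of itertools.permutations(pool, r) (order of tuples matches itertools)
def permsStr : Nat → List String → List (List String)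
  | 0, _ => [[]]
  | Nat.succ r, pool =>
    (List.range pool.length).flatMap (fun i =>
      (permsStr r (pool.eraseIdx i)).map (fun t => pool.getD i "" :: t))

def baseWords : List String := ["aya", "ye", "woo", "ma"]

-- word = ["aya","ye","woo","ma"]; then the three append loops of A
def wordList : List String :=
  let w2 := (permsStr 2 baseWords).foldl
    (fun acc i => acc ++ [(i.getD 0 "") ++ (i.getD 1 "")]) baseWords
  let w3 := (permsStr 3 baseWords).foldl
    (fun acc i => acc ++ [(i.getD 0 "") ++ (i.getD 1 "") ++ (i.getD 2 "")]) w2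
  (permsStr 4 baseWords).foldl
    (fun acc i => acc ++ [(i.getD 0 "") ++ (i.getD 1 "") ++ (i.getD 2 "") ++ (i.getD 3 "")]) w3

def solution (babbling : List String) : Int :=
  babbling.foldl (fun answer i => if wordList.contains i then answer + 1 else answer) 0

-- ===== PORT B =====
-- greedy parser: the startswith/elif chain of Source B, on the char list (the four
-- base words have distinct first letters); `used` is Source B's used list.
def parseB : List Char → List String → Bool
  | [], used => !used.isEmpty
  | 'a'::'y'::'a'::rest, used =>
      if used.contains "aya" then false else parseB rest ("aya"::used)
  | 'y'::'e'::rest, used =>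
      if used.contains "ye" then false else parseB rest ("ye"::used)
  | 'w'::'o'::'o'::rest, used =>
      if used.contains "woo" then false else parseB rest ("woo"::used)
  | 'm'::'a'::rest, used =>
      if used.contains "ma" then false else parseB rest ("ma"::used)
  | _, _ => false

def solution_alt (babbling : List String) : Int :=
  babbling.foldl (fun answer s => if parseB s.toList [] then answer + 1 else answer) 0

-- ===== PRECONDITION & SPEC =====
def Spec_solution (babbling : List String) (out : Int) : Prop := out = solution_alt babbling
instance (babbling : List String) (out : Int) : Decidable (Spec_solution babbling out) := by unfold Spec_solution; infer_instance

-- ===== CLAIM (what is proved, stated in full; the proofs are below) =====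
def Claim_equal_solution : Prop := ∀ (babbling : List String), Dom_solution babbling → Spec_solution babbling (solution babbling)

-- ===== LEMMAS AND PROOFS =====

def concatWs (ws : List String) : List Char := (ws.map String.toList).flatten

-- all length-n lists over baseWords
def tupleGen : Nat → List (List String)
  | 0 => [[]]
  | n + 1 => (tupleGen n).flatMap (fun t => baseWords.map (fun w => w :: t))

def allT : List (List String) :=
  tupleGen 0 ++ tupleGen 1 ++ tupleGen 2 ++ tupleGen 3 ++ tupleGen 4

theorem mem_tupleGen : ∀ (ws : List String), (∀ w ∈ ws, w ∈ baseWords) → ws ∈ tupleGen ws.length := by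
  intro ws
  induction ws with
  | nil => intro _; simp [tupleGen]
  | cons w t ih =>
    intro h
    simp only [List.length_cons, tupleGen, List.mem_flatMap]
    exact ⟨t, ih (fun x hx => h x (List.mem_cons_of_mem _ hx)),
      List.mem_map.mpr ⟨w, h w List.mem_cons_self, rfl⟩⟩

theorem parse_sound : ∀ (cs : List Char) (used : List String), parseB cs used = true →
    ∃ ws : List String, cs = concatWs ws ∧ ws.Nodup ∧
      (∀ w ∈ ws, w ∈ baseWords ∧ used.contains w = false) ∧ (used = [] → ws ≠ []) := by
  intro cs used
  induction cs, used using parseB.induct with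
  | case1 used =>
    intro h
    refine ⟨[], by simp [concatWs], by simp, by simp, ?_⟩
    intro hu; subst hu; simp [parseB] at h
  | case2 rest used hg => intro h; simp [parseB] at h; simp only [List.contains_iff_mem] at hg; exact absurd hg h.1
  | case4 rest used hg => intro h; simp [parseB] at h; simp only [List.contains_iff_mem] at hg; exact absurd hg h.1
  | case6 rest used hg => intro h; simp [parseB] at h; simp only [List.contains_iff_mem] at hg; exact absurd hg h.1
  | case8 rest used hg => intro h; simp [parseB] at h; simp only [List.contains_iff_mem] at hg; exact absurd hg h.1
  | case3 rest used hg ih =>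
    intro h
    have h' : parseB rest ("aya" :: used) = true := by simp [parseB] at h; exact h.2
    obtain ⟨ws', hcs, hnd, hmem, _⟩ := ih h'
    simp only [Bool.not_eq_true] at hg
    refine ⟨"aya" :: ws', by simp [concatWs, hcs], ?_, ?_, by simp⟩
    · refine List.nodup_cons.mpr ⟨fun hin => ?_, hnd⟩
      have := (hmem _ hin).2; simp at this
    · intro w hw
      rcases List.mem_cons.mp hw with rfl | hw'
      · exact ⟨by decide, hg⟩
      · have := hmem _ hw'; simp at this
        exact ⟨this.1, by simpa using this.2.2⟩
  | case5 rest used hg ih =>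
    intro h
    have h' : parseB rest ("ye" :: used) = true := by simp [parseB] at h; exact h.2
    obtain ⟨ws', hcs, hnd, hmem, _⟩ := ih h'
    simp only [Bool.not_eq_true] at hg
    refine ⟨"ye" :: ws', by simp [concatWs, hcs], ?_, ?_, by simp⟩
    · refine List.nodup_cons.mpr ⟨fun hin => ?_, hnd⟩
      have := (hmem _ hin).2; simp at this
    · intro w hw
      rcases List.mem_cons.mp hw with rfl | hw'
      · exact ⟨by decide, hg⟩
      · have := hmem _ hw'; simp at this
        exact ⟨this.1, by simpa using this.2.2⟩
  | case7 rest used hg ih =>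
    intro h
    have h' : parseB rest ("woo" :: used) = true := by simp [parseB] at h; exact h.2
    obtain ⟨ws', hcs, hnd, hmem, _⟩ := ih h'
    simp only [Bool.not_eq_true] at hg
    refine ⟨"woo" :: ws', by simp [concatWs, hcs], ?_, ?_, by simp⟩
    · refine List.nodup_cons.mpr ⟨fun hin => ?_, hnd⟩
      have := (hmem _ hin).2; simp at this
    · intro w hw
      rcases List.mem_cons.mp hw with rfl | hw'
      · exact ⟨by decide, hg⟩
      · have := hmem _ hw'; simp at this
        exact ⟨this.1, by simpa using this.2.2⟩
  | case9 rest used hg ih =>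
    intro h
    have h' : parseB rest ("ma" :: used) = true := by simp [parseB] at h; exact h.2
    obtain ⟨ws', hcs, hnd, hmem, _⟩ := ih h'
    simp only [Bool.not_eq_true] at hg
    refine ⟨"ma" :: ws', by simp [concatWs, hcs], ?_, ?_, by simp⟩
    · refine List.nodup_cons.mpr ⟨fun hin => ?_, hnd⟩
      have := (hmem _ hin).2; simp at this
    · intro w hw
      rcases List.mem_cons.mp hw with rfl | hw'
      · exact ⟨by decide, hg⟩
      · have := hmem _ hw'; simp at this
        exact ⟨this.1, by simpa using this.2.2⟩
  | case10 t x h1 h2 h3 h4 h5 =>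
    intro h
    exfalso
    rw [parseB.eq_def] at h
    split at h <;>
      first
        | exact h1 rfl
        | exact h2 _ rfl
        | exact h3 _ rfl
        | exact h4 _ rfl
        | exact h5 _ rfl
        | simp_all

set_option maxRecDepth 10000 in
theorem key_mem : ∀ ws ∈ allT, ws.Nodup → ws ≠ [] →
    wordList.contains (String.ofList (concatWs ws)) = true := by decide

set_option maxRecDepth 10000 in
theorem bk : ∀ s ∈ wordList, parseB s.toList [] = true := by decide

theorem mem_allT (ws : List String) (hnd : ws.Nodup) (hb : ∀ w ∈ ws, w ∈ baseWords) :
    ws ∈ allT := by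
  have hsub : ws ⊆ baseWords := hb
  have hlen : ws.length ≤ 4 := (hnd.subperm hsub).length_le
  have := mem_tupleGen ws hb
  interval_cases h : ws.length <;> simp_all [allT]

theorem pointwise (s : String) : wordList.contains s = parseB s.toList [] := by
  cases hp : parseB s.toList [] with
  | false =>
    cases hc : wordList.contains s with
    | false => rfl
    | true =>
      exfalso
      have hs : s ∈ wordList := by simpa using hc
      rw [bk s hs] at hp; exact Bool.false_ne_true hp.symm
  | true =>
    obtain ⟨ws, hcs, hnd, hmem, hne⟩ := parse_sound s.toList [] hp
    have hin := mem_allT ws hnd (fun w hw => (hmem w hw).1)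
    have := key_mem ws hin hnd (hne rfl)
    rwa [← hcs, String.ofList_toList] at this

-- ===== VERDICT (by name: the statement is the Claim_ definition above) =====
theorem solution_spec : Claim_equal_solution := by
  intro babbling _
  unfold Spec_solution solution solution_alt
  have h : (fun (answer : Int) (i : String) => if wordList.contains i then answer + 1 else answer)
      = (fun (answer : Int) (s : String) => if parseB s.toList [] then answer + 1 else answer) := by
    funext a s; rw [pointwise]
  rw [h]
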